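-- pv_equiv track=rewrite | github.com/ianmnz/adventofcode | src/y2025/d02.py | is_in_any_range
-- ===== SOURCE A (Python) =====
-- from collections.abc import Iterable
--
-- Interval = tuple[int, int]
--
-- def is_in_any_range(id_ranges: Iterable[Interval], candidate: int) -> bool:
--     lower, upper = 0, len(id_ranges) - 1
--
--     while lower <= upper:
--         mid = (lower + upper) // 2
--
--         if candidate > id_ranges[mid][1]:
--             lower = mid + 1
--         elif candidate < id_ranges[mid][0]:
--             upper = mid - 1
--         else:
--             return True
--
--     return False
-- ===== SOURCE B (Python) =====
-- def is_in_any_range(id_ranges, candidate):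
--     # Recursive decomposition: binary search by splitting the interval list
--     # at its middle element and recursing on the matching half (same probe
--     # sequence as an index-based search with mid = (lower+upper)//2).
--     ranges = list(id_ranges)
--     if not ranges:
--         return False
--     mid = (len(ranges) - 1) // 2
--     low, high = ranges[mid]
--     if candidate > high:
--         return is_in_any_range(ranges[mid + 1:], candidate)
--     if candidate < low:
--         return is_in_any_range(ranges[:mid], candidate)
--     return True
-- ===== Notes on version B (the rewrite author's own statement) =====
-- stated objective: alternative
-- what changed: The iterative index-bookkeeping binary search (mutable lower/upper over the original list) is replaced by a structural recursion that slices the list at its middle element and recurses on the matching half, probing the same sequence of elements.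
import Mathlib
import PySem

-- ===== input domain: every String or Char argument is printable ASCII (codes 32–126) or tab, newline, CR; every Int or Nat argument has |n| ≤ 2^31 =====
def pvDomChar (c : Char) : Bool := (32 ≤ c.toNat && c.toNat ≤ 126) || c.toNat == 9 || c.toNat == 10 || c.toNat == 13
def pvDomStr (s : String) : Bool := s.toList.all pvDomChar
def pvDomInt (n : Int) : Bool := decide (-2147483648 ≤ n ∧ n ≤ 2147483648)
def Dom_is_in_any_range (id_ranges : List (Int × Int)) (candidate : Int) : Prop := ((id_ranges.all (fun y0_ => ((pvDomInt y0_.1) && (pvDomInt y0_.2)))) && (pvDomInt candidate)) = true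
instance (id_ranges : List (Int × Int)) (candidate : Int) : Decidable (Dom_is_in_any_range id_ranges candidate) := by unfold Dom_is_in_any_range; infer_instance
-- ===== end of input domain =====

-- B replaces A's iterative index-bookkeeping binary search by a structural
-- recursion that slices the list at its middle element; same probe sequence,
-- same result (alternative decomposition, no speed claim).

-- ===== PORT A =====
-- A's while loop over mutable (lower, upper); mid = (lower + upper) // 2 and
-- the probed pair id_ranges[mid] are written inline.  Whenever the loop body
-- runs, 0 ≤ lower ≤ mid ≤ upper ≤ len - 1, so the index is always in range
-- and the pyGetD default is never used: the port is exact.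
def pvLoopA (xs : List (Int × Int)) (c : Int) (lower upper : Int) : Bool :=
  if h : lower ≤ upper then
    if c > (PySem.List.pyGetD xs (PySem.Int.floordiv (lower + upper) 2) ((0 : Int), (0 : Int))).2 then
      pvLoopA xs c (PySem.Int.floordiv (lower + upper) 2 + 1) upper
    else if c < (PySem.List.pyGetD xs (PySem.Int.floordiv (lower + upper) 2) ((0 : Int), (0 : Int))).1 then
      pvLoopA xs c lower (PySem.Int.floordiv (lower + upper) 2 - 1)
    else true
  else false
termination_by (upper + 1 - lower).toNat
decreasing_by
  all_goals
    have hb := PySem.Int.floordiv_two_mid_bounds h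
    omega

def is_in_any_range (id_ranges : List (Int × Int)) (candidate : Int) : Bool :=
  pvLoopA id_ranges candidate 0 ((id_ranges.length : Int) - 1)

-- ===== PORT B =====
-- structural recursion on the list: probe the middle element
-- (mid = (len - 1) // 2, in range on any nonempty list), recurse on a slice
def is_in_any_range_alt (id_ranges : List (Int × Int)) (candidate : Int) : Bool :=
  if hne : id_ranges = [] then false
  else
    if candidate > (PySem.List.pyGetD id_ranges (PySem.Int.floordiv ((id_ranges.length : Int) - 1) 2) ((0 : Int), (0 : Int))).2 then
      is_in_any_range_alt (PySem.List.slice id_ranges (some (PySem.Int.floordiv ((id_ranges.length : Int) - 1) 2 + 1))) candidate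
    else if candidate < (PySem.List.pyGetD id_ranges (PySem.Int.floordiv ((id_ranges.length : Int) - 1) 2) ((0 : Int), (0 : Int))).1 then
      is_in_any_range_alt (PySem.List.slice id_ranges none (some (PySem.Int.floordiv ((id_ranges.length : Int) - 1) 2))) candidate
    else true
termination_by id_ranges.length
decreasing_by
  all_goals
    have hl : id_ranges.length ≠ 0 := by simpa [List.length_eq_zero_iff] using hne
    have hf : PySem.Int.floordiv ((id_ranges.length : Int) - 1) 2 = ((id_ranges.length : Int) - 1) / 2 :=
      PySem.Int.floordiv_eq_ediv_of_pos (by norm_num)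
    rw [hf]
  · rw [PySem.List.slice_from id_ranges (by omega)]
    simp only [List.length_drop]
    omega
  · rw [PySem.List.slice_to id_ranges (by omega)]
    simp only [List.length_take]
    omega

-- ===== PRECONDITION & SPEC =====
def Spec_is_in_any_range (id_ranges : List (Int × Int)) (candidate : Int) (out : Bool) : Prop := out = is_in_any_range_alt id_ranges candidate
instance (id_ranges : List (Int × Int)) (candidate : Int) (out : Bool) : Decidable (Spec_is_in_any_range id_ranges candidate out) := by unfold Spec_is_in_any_range; infer_instance

-- ===== CLAIM (what is proved, stated in full; the proofs are below) =====
def Claim_equal_is_in_any_range : Prop := ∀ (id_ranges : List (Int × Int)) (candidate : Int), Dom_is_in_any_range id_ranges candidate → Spec_is_in_any_range id_ranges candidate (is_in_any_range id_ranges candidate)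

-- ===== LEMMAS AND PROOFS =====

-- A's loop on the index window [lower, upper] computes B's recursion on the
-- corresponding slice xs[lower : upper + 1].
lemma pvLoopA_eq_alt_slice (k : Nat) :
    ∀ (xs : List (Int × Int)) (c lower upper : Int),
      (upper + 1 - lower).toNat ≤ k → 0 ≤ lower → -1 ≤ upper → upper < (xs.length : Int) →
      pvLoopA xs c lower upper
        = is_in_any_range_alt (PySem.List.slice xs (some lower) (some (upper + 1))) c := by
  induction k with
  | zero =>
    intro xs c lower upper hk h0 hm1 hlen
    rw [pvLoopA, dif_neg (by omega : ¬ lower ≤ upper)]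
    rw [PySem.List.slice_toNat xs h0 (by omega)]
    have hz : (upper + 1).toNat - lower.toNat = 0 := by omega
    rw [hz, List.take_zero, is_in_any_range_alt]
    simp
  | succ k ih =>
    intro xs c lower upper hk h0 hm1 hlen
    by_cases h : lower ≤ upper
    · -- window nonempty
      have hsub : PySem.List.slice xs (some lower) (some (upper + 1))
          = (xs.drop lower.toNat).take ((upper + 1).toNat - lower.toNat) :=
        PySem.List.slice_toNat xs h0 (by omega)
      set sub := PySem.List.slice xs (some lower) (some (upper + 1)) with hsubdef
      have hlsub : sub.length = (upper + 1).toNat - lower.toNat := by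
        rw [hsub]; simp only [List.length_take, List.length_drop]; omega
      have hsubne : sub ≠ [] := by
        intro hnil; rw [hnil] at hlsub; simp at hlsub; omega
      have hA : PySem.Int.floordiv (lower + upper) 2 = (lower + upper) / 2 :=
        PySem.Int.floordiv_eq_ediv_of_pos (by norm_num)
      obtain ⟨M, hM⟩ : ∃ M, PySem.Int.floordiv ((sub.length : Int) - 1) 2 = M := ⟨_, rfl⟩
      have hMdef : M = ((sub.length : Int) - 1) / 2 := by
        rw [← hM, PySem.Int.floordiv_eq_ediv_of_pos (by norm_num)]
      have hM0 : 0 ≤ M := by rw [hMdef, hlsub]; omega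
      have hMlt : M < (sub.length : Int) := by rw [hMdef]; omega
      -- A's midpoint is lower + B's midpoint
      have hmid : PySem.Int.floordiv (lower + upper) 2 = lower + M := by
        rw [hA, hMdef, hlsub]; omega
      -- both sides probe the same element
      have helem : PySem.List.pyGetD sub M ((0 : Int), (0 : Int))
          = PySem.List.pyGetD xs (lower + M) ((0 : Int), (0 : Int)) := by
        rw [PySem.List.pyGetD_eq_getElem sub _ hM0 hMlt,
            PySem.List.pyGetD_eq_getElem xs _ (by omega) (by omega)]
        simp only [hsub]
        rw [List.getElem_take, List.getElem_drop]
        congr 1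
        omega
      rw [pvLoopA, dif_pos h, is_in_any_range_alt, dif_neg hsubne, hM, hmid, helem]
      by_cases hgt : c > (PySem.List.pyGetD xs (lower + M) ((0 : Int), (0 : Int))).2
      · rw [if_pos hgt, if_pos hgt]
        have hs1 : PySem.List.slice sub (some (M + 1))
            = PySem.List.slice xs (some (lower + M + 1)) (some (upper + 1)) := by
          rw [PySem.List.slice_from sub (by omega),
              PySem.List.slice_toNat xs (by omega) (by omega), hsub,
              List.drop_take, List.drop_drop]
          have e1 : lower.toNat + (M + 1).toNat = (lower + M + 1).toNat := by omega
          have e2 : (upper + 1).toNat - lower.toNat - (M + 1).toNat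
              = (upper + 1).toNat - (lower + M + 1).toNat := by omega
          rw [e1, e2]
        rw [hs1]
        exact ih xs c (lower + M + 1) upper (by omega) (by omega) (by omega) hlen
      · rw [if_neg hgt, if_neg hgt]
        by_cases hlt : c < (PySem.List.pyGetD xs (lower + M) ((0 : Int), (0 : Int))).1
        · rw [if_pos hlt, if_pos hlt]
          have hs2 : PySem.List.slice sub none (some M)
              = PySem.List.slice xs (some lower) (some (lower + M - 1 + 1)) := by
            rw [PySem.List.slice_to sub hM0,
                PySem.List.slice_toNat xs h0 (by omega), hsub, List.take_take]
            congr 1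
            omega
          rw [hs2]
          exact ih xs c lower (lower + M - 1)
            (by rw [hMdef, hlsub] at hM0 ⊢; omega) h0 (by omega) (by omega)
        · rw [if_neg hlt, if_neg hlt]
    · -- empty window
      rw [pvLoopA, dif_neg h]
      rw [PySem.List.slice_toNat xs h0 (by omega)]
      have hz : (upper + 1).toNat - lower.toNat = 0 := by omega
      rw [hz, List.take_zero, is_in_any_range_alt]
      simp

-- ===== VERDICT (by name: the statement is the Claim_ definition above) =====
theorem is_in_any_range_spec : Claim_equal_is_in_any_range := by
  intro xs c _
  unfold Spec_is_in_any_range is_in_any_range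
  rw [pvLoopA_eq_alt_slice (xs.length) xs c 0 ((xs.length : Int) - 1)
        (by omega) (by omega) (by omega) (by omega)]
  congr 1
  have h1 : ((xs.length : Int) - 1 + 1) = (xs.length : Int) := by omega
  rw [h1]
  simp [PySem.List.slice_to_natCast]
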